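-- pv_equiv track=rewrite | github.com/natemago/adventofcode2017 | day4_high_entropy_passphrases/solution2.py | word_signature
-- ===== SOURCE A (Python) =====
-- def word_signature(word):
--     sig = {}
--     for l in word:
--         if not sig.get(l):
--             sig[l] = 1
--         else:
--             sig[l] += 1
--
--     letters = sorted([k for k,_ in sig.items()])
--     return ''.join(['%s%d'%(l, sig[l]) for l in letters])
-- ===== SOURCE B (Python) =====
-- def word_signature(word):
--     def emit(s):
--         if not s:
--             return ''
--         c = s[0]
--         i = 1
--         while i < len(s) and s[i] == c:
--             i += 1
--         return '%s%d' % (c, i) + emit(s[i:])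
--     return emit(sorted(word))
-- ===== Notes on version B (the rewrite author's own statement) =====
-- stated objective: alternative
-- what changed: B replaces A's frequency-dict build plus separate sort of the distinct keys with a single sort of all characters followed by a run-length scan of equal consecutive runs.
import Mathlib
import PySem

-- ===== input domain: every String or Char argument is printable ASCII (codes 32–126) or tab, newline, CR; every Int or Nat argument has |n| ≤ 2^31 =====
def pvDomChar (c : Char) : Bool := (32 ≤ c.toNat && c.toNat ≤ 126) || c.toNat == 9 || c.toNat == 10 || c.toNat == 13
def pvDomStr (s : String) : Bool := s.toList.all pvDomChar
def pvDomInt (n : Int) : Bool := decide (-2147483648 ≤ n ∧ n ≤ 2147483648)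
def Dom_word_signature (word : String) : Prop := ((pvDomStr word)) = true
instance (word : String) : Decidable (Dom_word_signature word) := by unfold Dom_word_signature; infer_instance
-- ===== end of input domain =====

-- B replaces A's frequency-dict build plus separate key sort with one sort of all
-- characters followed by a run-length scan; same cost class, no speed claim.

-- ===== PORT A =====
-- 'sig = {}; for l in word: if not sig.get(l): sig[l] = 1 else: sig[l] += 1'
-- (counts are positive ints, so 'not sig.get(l)' is exactly 'sig.get(l, 0) == 0');
-- then the sorted keys, joined as '%s%d' % (l, sig[l]) at character level.
def word_signature (word : String) : String :=
  let sig := word.toList.foldl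
    (fun sig l => if sig.getD l 0 = 0 then sig.insert l 1 else sig.insert l (sig.getD l 0 + 1))
    (PySem.Dict.empty : PySem.Dict Char Int)
  let letters := PySem.List.sorted (sig.items.map (fun kv => kv.1)) (fun k => k) false
  String.ofList ((letters.map (fun l => l :: PySem.Int.toChars (sig.getD l 0))).flatten)

-- ===== PORT B =====
-- Source B's 'emit': scan the run of characters equal to s[0] (the inner while loop is
-- the takeWhile over the tail), emit '%s%d' % (c, i), recurse on s[i:].
def wsEmit : List Char → List Char
  | [] => []
  | c :: rest =>
    let run := rest.takeWhile (fun x => x == c)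
    (c :: PySem.Int.toChars ((run.length : Int) + 1)) ++ wsEmit (rest.drop run.length)
  termination_by s => s.length
  decreasing_by
    simp only [List.length_drop, List.length_cons]
    omega

def word_signature_alt (word : String) : String :=
  String.ofList (wsEmit (PySem.List.sorted word.toList (fun x => x) false))

-- ===== PRECONDITION & SPEC =====
def Spec_word_signature (word : String) (out : String) : Prop := out = word_signature_alt word
instance (word : String) (out : String) : Decidable (Spec_word_signature word out) := by unfold Spec_word_signature; infer_instance

-- ===== CLAIM (what is proved, stated in full; the proofs are below) =====
def Claim_equal_word_signature : Prop := ∀ (word : String), Dom_word_signature word → Spec_word_signature word (word_signature word)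

-- ===== LEMMAS AND PROOFS =====

-- A's counting loop builds exactly Counter(word).
lemma ws_fold_eq_counter (cs : List Char) :
    cs.foldl
      (fun sig l => if sig.getD l 0 = 0 then sig.insert l 1 else sig.insert l (sig.getD l 0 + 1))
      (PySem.Dict.empty : PySem.Dict Char Int) = PySem.Dict.counter cs := by
  rw [← PySem.Dict.foldl_insert_getD_add_one_eq_counter]
  congr 1
  funext d x
  split_ifs with h
  · rw [h]; norm_num
  · rfl

-- Two nodup char lists with the same members are permutations of each other.
lemma ws_perm_of_mem_iff {l l' : List Char} (hl : l.Nodup) (hl' : l'.Nodup)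
    (h : ∀ x, x ∈ l ↔ x ∈ l') : l.Perm l' := by
  refine List.perm_of_nodup_nodup_toFinset_eq hl hl' ?_
  ext x
  simp [h]

-- If c is a lower bound of a weakly sorted list, c does not survive dropWhile (== c).
lemma ws_not_mem_dropWhile (c : Char) (rest : List Char)
    (hpr : rest.Pairwise (· ≤ ·)) (hle : ∀ x ∈ rest, c ≤ x) :
    c ∉ rest.dropWhile (fun x => x == c) := by
  induction rest with
  | nil => simp
  | cons a t ih =>
    rw [List.dropWhile_cons]
    split_ifs with ha
    · exact ih (List.pairwise_cons.mp hpr).2 (fun x hx => hle x (List.mem_cons_of_mem _ hx))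
    · intro hmem
      have hac : a ≠ c := fun h => ha (by simp [h])
      rcases List.mem_cons.mp hmem with h | h
      · exact hac h.symm
      · have h1 : a ≤ c := (List.pairwise_cons.mp hpr).1 c h
        have h2 : c ≤ a := hle a List.mem_cons_self
        exact hac (le_antisymm h1 h2)

-- Core: on a weakly sorted list, the run-length scan equals the strictly sorted
-- distinct letters, each followed by its count.
lemma wsEmit_eq_flatMap :
    ∀ (n : Nat) (s : List Char), s.length ≤ n → s.Pairwise (· ≤ ·) →
    wsEmit s = (PySem.List.sorted (PySem.Set.ofList s) (fun x => x) false).flatMap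
      (fun c => c :: PySem.Int.toChars ((s.count c : Int))) := by
  intro n
  induction n with
  | zero =>
    intro s hlen _
    have : s = [] := List.eq_nil_of_length_eq_zero (Nat.le_zero.mp hlen)
    subst this
    simp [wsEmit]
  | succ n ih =>
    intro s hlen hpair
    cases s with
    | nil => simp [wsEmit]
    | cons c rest =>
      have hle : ∀ x ∈ rest, c ≤ x := (List.pairwise_cons.mp hpair).1
      have hpr : rest.Pairwise (· ≤ ·) := (List.pairwise_cons.mp hpair).2
      obtain ⟨run, hrun_def⟩ : ∃ r, r = rest.takeWhile (fun x => x == c) := ⟨_, rfl⟩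
      obtain ⟨dropped, hdropped_def⟩ : ∃ d, d = rest.dropWhile (fun x => x == c) := ⟨_, rfl⟩
      have hsplit : run ++ dropped = rest := by
        rw [hrun_def, hdropped_def]; exact List.takeWhile_append_dropWhile
      have hdrop : rest.drop run.length = dropped := by
        conv_lhs => rw [← hsplit]
        exact List.drop_left
      have hrun_eq : ∀ x ∈ run, x = c := by
        intro x hx
        rw [hrun_def] at hx
        have hb := List.mem_takeWhile_imp (p := fun y => y == c) hx
        exact eq_of_beq (by simpa using hb)
      have hpd : dropped.Pairwise (· ≤ ·) := by
        rw [hdropped_def]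
        exact List.Pairwise.sublist (List.dropWhile_sublist _) hpr
      have hcnot : c ∉ dropped := by
        rw [hdropped_def]
        exact ws_not_mem_dropWhile c rest hpr hle
      have hlt : ∀ x ∈ dropped, c < x := by
        intro x hx
        have hxr : x ∈ rest := by
          rw [← hsplit]
          exact List.mem_append.mpr (Or.inr hx)
        exact lt_of_le_of_ne (hle x hxr) (fun h => hcnot (by rwa [← h] at hx))
      have hrun_count : run.count c = run.length :=
        List.count_eq_length.mpr (fun b hb => (hrun_eq b hb).symm)
      have hc_count : (c :: rest).count c = run.length + 1 := by
        rw [List.count_cons_self, ← hsplit, List.count_append, hrun_count,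
            List.count_eq_zero.mpr hcnot]
      have hcount_ne : ∀ x, x ≠ c → (c :: rest).count x = dropped.count x := by
        intro x hx
        have h0 : run.count x = 0 := List.count_eq_zero.mpr (fun hm => hx (hrun_eq x hm))
        rw [← hsplit]
        simp [List.count_append, h0, Ne.symm hx]
      have hsorted_set :
          PySem.List.sorted (PySem.Set.ofList (c :: rest)) (fun x => x) false
            = c :: PySem.List.sorted (PySem.Set.ofList dropped) (fun x => x) false := by
        apply PySem.List.sorted_eq_of_perm_of_pairwise_lt
        · apply ws_perm_of_mem_iff
          · refine List.nodup_cons.mpr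
              ⟨?_, ((PySem.List.sorted_perm _ _ _).nodup_iff).mpr (PySem.Set.nodup_ofList _)⟩
            intro hc
            exact hcnot ((PySem.Set.mem_ofList _ _).mp ((PySem.List.mem_sorted _ _ _ _).mp hc))
          · exact PySem.Set.nodup_ofList _
          · intro x
            simp only [List.mem_cons, PySem.List.mem_sorted, PySem.Set.mem_ofList, ← hsplit,
              List.mem_append]
            constructor
            · rintro (h | h)
              · exact Or.inl h
              · exact Or.inr (Or.inr h)
            · rintro (h | h | h)
              · exact Or.inl h
              · exact Or.inl (hrun_eq x h)
              · exact Or.inr h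
        · exact List.pairwise_cons.mpr
            ⟨fun x hx => hlt x ((PySem.Set.mem_ofList _ _).mp ((PySem.List.mem_sorted _ _ _ _).mp hx)),
             PySem.List.sorted_ofList_pairwise_lt dropped⟩
      have hlen' : dropped.length ≤ n := by
        have h1 := congrArg List.length hsplit
        simp only [List.length_append] at h1
        simp only [List.length_cons] at hlen
        omega
      simp only [wsEmit]
      rw [← hrun_def, hdrop, ih dropped hlen' hpd, hsorted_set, List.flatMap_cons]
      congr 1
      · rw [hc_count]
        norm_cast
      · apply List.flatMap_congr
        intro x hx
        have hxd : x ∈ dropped :=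
          (PySem.Set.mem_ofList _ _).mp ((PySem.List.mem_sorted _ _ _ _).mp hx)
        rw [hcount_ne x (fun he => hcnot (he ▸ hxd))]

-- ===== VERDICT (by name: the statement is the Claim_ definition above) =====
theorem word_signature_spec : Claim_equal_word_signature := by
  intro word _
  unfold Spec_word_signature word_signature word_signature_alt
  simp only [ws_fold_eq_counter]
  have hperm : (PySem.List.sorted word.toList (fun x => x) false).Perm word.toList :=
    PySem.List.sorted_perm _ _ _
  have hpair : (PySem.List.sorted word.toList (fun x => x) false).Pairwise (· ≤ ·) := by
    simpa using PySem.List.sorted_pairwise word.toList (fun x => x)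
  have hkeys : List.map (fun kv => kv.1) (PySem.Dict.counter word.toList).items
      = PySem.Set.ofList word.toList := by
    simpa [PySem.Dict.keys] using PySem.Dict.keys_counter word.toList
  have hsetperm :
      (PySem.Set.ofList (PySem.List.sorted word.toList (fun x => x) false) : List Char).Perm
        (PySem.Set.ofList word.toList) :=
    ws_perm_of_mem_iff (PySem.Set.nodup_ofList _) (PySem.Set.nodup_ofList _)
      (fun x => by rw [PySem.Set.mem_ofList, PySem.Set.mem_ofList]; exact hperm.mem_iff)
  rw [wsEmit_eq_flatMap _ _ le_rfl hpair,
      PySem.List.sorted_eq_sorted_of_perm _ _ _ (fun a b h => h) hsetperm, hkeys,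
      ← List.flatMap_def]
  congr 1
  apply List.flatMap_congr
  intro x _
  rw [PySem.Dict.getD_counter, hperm.count_eq]
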